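-- pv_equiv track=rewrite | github.com/cano057/AnalyzeAxiom | Capital/CapitalAnalyzer.py | analyzeOrigin
-- ===== SOURCE A (Python) =====
-- def addValue(key, value, dictionary):
--     if dictionary[key] == "":
--         return value
--     else:
--         return dictionary[key] + "." + value
--
-- def analyzeOrigin(models):
--     listOfModels = {"DM":"" , "DE":"" , "DS":""}
--     isDE = False
--     for model in models.split("."):
--         if len(model.split("Data_Enrichment")) > 1:
--             isDE = True
--             modelSplitted = model.split(":")
--             listOfModels["DE"] = addValue("DE", modelSplitted[1], listOfModels)
--         elif isDE:
--             listOfModels["DS"] = addValue("DS", model, listOfModels)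
--         else:
--             listOfModels["DM"] = addValue("DM", model, listOfModels)
--     return listOfModels
-- ===== SOURCE B (Python) =====
-- def dotjoin(parts):
--     out = ""
--     for p in parts:
--         out = p if out == "" else out + "." + p
--     return out
--
-- def analyzeOrigin(models):
--     tokens = models.split(".")
--     de_idx = len(tokens)
--     for i, t in enumerate(tokens):
--         if "Data_Enrichment" in t:
--             de_idx = i
--             break
--     dm = tokens[:de_idx]
--     de = [t.split(":")[1] for t in tokens if "Data_Enrichment" in t]
--     ds = [t for t in tokens[de_idx + 1:] if "Data_Enrichment" not in t]
--     return {"DM": dotjoin(dm), "DE": dotjoin(de), "DS": dotjoin(ds)}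
-- ===== Notes on version B (the rewrite author's own statement) =====
-- stated objective: alternative
-- what changed: Replaces A's single stateful pass (mutable 3-key dict plus a running isDE flag, appending to the dict entry token by token) by an index-first two-phase classification: find the index of the first 'Data_Enrichment' token, then build the DM group by slicing before that index, the DE group by filter+extract, the DS group by slicing after it and filtering, and join each group once at the end.
import Mathlib
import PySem

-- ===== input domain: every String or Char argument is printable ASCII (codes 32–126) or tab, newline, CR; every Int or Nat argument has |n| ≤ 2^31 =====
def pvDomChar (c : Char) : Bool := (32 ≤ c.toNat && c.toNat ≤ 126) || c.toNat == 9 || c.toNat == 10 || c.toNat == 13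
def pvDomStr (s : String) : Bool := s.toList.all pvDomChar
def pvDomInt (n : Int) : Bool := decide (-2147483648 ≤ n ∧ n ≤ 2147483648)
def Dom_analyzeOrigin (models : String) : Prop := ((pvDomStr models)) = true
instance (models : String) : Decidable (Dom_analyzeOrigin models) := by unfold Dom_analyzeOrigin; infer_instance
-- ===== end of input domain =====

-- B replaces A's single stateful pass (mutable dict + running isDE flag) by an index-first two-phase
-- classification: find the index of the first 'Data_Enrichment' token, then build the three groups by
-- slicing/filtering and join each group once (objective: alternative decomposition, same cost).

-- ===== PORT A =====
-- addValue(key, value, dictionary); dictionary[key] always present here, so getD is exact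
def addValue (key value : String) (dictionary : PySem.Dict String String) : String :=
  if dictionary.getD key "" == "" then value
  else dictionary.getD key "" ++ "." ++ value

def analyzeOrigin (models : String) : List (String × String) :=
  let listOfModels : PySem.Dict String String :=
    PySem.Dict.ofList [("DM", ""), ("DE", ""), ("DS", "")]
  -- for model in models.split("."): … with state (listOfModels, isDE)
  let st := ((PySem.Str.split? models ".").getD []).foldl
    (fun (st : PySem.Dict String String × Bool) model =>
      if 1 < ((PySem.Str.split? model "Data_Enrichment").getD []).length then
        let modelSplitted := (PySem.Str.split? model ":").getD []
        -- modelSplitted[1]: IndexError (pyGet? = none) is excluded by Pre_analyzeOrigin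
        (st.1.insert "DE" (addValue "DE" ((PySem.List.pyGet? modelSplitted 1).getD "") st.1), true)
      else if st.2 then
        (st.1.insert "DS" (addValue "DS" model st.1), st.2)
      else
        (st.1.insert "DM" (addValue "DM" model st.1), st.2))
    (listOfModels, false)
  st.1.items

-- ===== PORT B =====
def dotjoin (parts : List String) : String :=
  parts.foldl (fun out p => if out == "" then p else out ++ "." ++ p) ""

-- the 'for i, t in enumerate(tokens): if "Data_Enrichment" in t: de_idx = i; break' loop
-- (returns tokens.length when no token matches, like Source B's de_idx = len(tokens) default)
def firstDEIdx : List String → Nat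
  | [] => 0
  | t :: ts => if PySem.Str.isIn "Data_Enrichment" t then 0 else firstDEIdx ts + 1

def analyzeOrigin_alt (models : String) : List (String × String) :=
  let tokens := (PySem.Str.split? models ".").getD []
  let deIdx := firstDEIdx tokens
  let dm := PySem.List.slice tokens none (some ((deIdx : Nat) : Int))
  let de := (tokens.filter (fun t => PySem.Str.isIn "Data_Enrichment" t)).map
    -- t.split(":")[1]: IndexError (pyGet? = none) is excluded by Pre_analyzeOrigin
    (fun t => (PySem.List.pyGet? ((PySem.Str.split? t ":").getD []) 1).getD "")
  let ds := (PySem.List.slice tokens (some ((deIdx + 1 : Nat) : Int)) none).filter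
    (fun t => !(PySem.Str.isIn "Data_Enrichment" t))
  [("DM", dotjoin dm), ("DE", dotjoin de), ("DS", dotjoin ds)]

-- ===== PRECONDITION & SPEC =====
-- Pre_ excludes exactly the inputs where Python A raises IndexError: a dot-token containing
-- "Data_Enrichment" but no ":" makes model.split(":")[1] fail (B's t.split(":")[1] raises there too).
def Pre_analyzeOrigin (models : String) : Prop :=
  ∀ t ∈ (PySem.Str.split? models ".").getD [],
    1 < ((PySem.Str.split? t "Data_Enrichment").getD []).length →
    2 ≤ ((PySem.Str.split? t ":").getD []).length
instance (models : String) : Decidable (Pre_analyzeOrigin models) := by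
  unfold Pre_analyzeOrigin; infer_instance

def pvWitness_analyzeOrigin : String := "model1.Data_Enrichment:enr.store1"

def Spec_analyzeOrigin (models : String) (out : List (String × String)) : Prop := out = analyzeOrigin_alt models
instance (models : String) (out : List (String × String)) : Decidable (Spec_analyzeOrigin models out) := by unfold Spec_analyzeOrigin; infer_instance

-- ===== CLAIM (what is proved, stated in full; the proofs are below) =====
def Claim_equal_analyzeOrigin : Prop := ∀ (models : String), Dom_analyzeOrigin models → Pre_analyzeOrigin models → Spec_analyzeOrigin models (analyzeOrigin models)

-- ===== LEMMAS AND PROOFS =====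

-- A's branch test, B's membership test, the ':'-extraction, and the shared accumulator step, named
def isDEb (t : String) : Bool := decide (1 < ((PySem.Str.split? t "Data_Enrichment").getD []).length)
def extrT (t : String) : String := (PySem.List.pyGet? ((PySem.Str.split? t ":").getD []) 1).getD ""
def avF (out p : String) : String := if out == "" then p else out ++ "." ++ p

-- abstract run of A's loop on the three dict values
def runA : List String → Bool → String × String × String → String × String × String
  | [], _, acc => acc
  | t :: ts, flag, (a, b, c) =>
    if isDEb t then runA ts true (a, avF b (extrT t), c)
    else if flag then runA ts flag (a, b, avF c t)
    else runA ts flag (avF a t, b, c)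

-- the three classification lists, mirroring the flag automaton
def dmL : List String → List String
  | [] => []
  | t :: ts => if isDEb t then [] else t :: dmL ts
def deL : List String → List String
  | [] => []
  | t :: ts => if isDEb t then extrT t :: deL ts else deL ts
def dsL : List String → Bool → List String
  | [], _ => []
  | t :: ts, flag =>
    if isDEb t then dsL ts true
    else if flag then t :: dsL ts flag
    else dsL ts flag

-- ---- 1 < len(s.split(sep)) ↔ sep occurs in s (sep ≠ []), proved on splitOn.go ----
theorem go_len_ge (sep : List Char) (fuel : Nat) :
    ∀ (l cur : List Char) (acc : List (List Char)),
      acc.length + 1 ≤ (PySem.Chars.splitOn.go sep fuel l cur acc).length := by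
  induction fuel with
  | zero => intro l cur acc; simp [PySem.Chars.splitOn.go]
  | succ f ih =>
    intro l cur acc
    match l with
    | [] => simp [PySem.Chars.splitOn.go]
    | c :: rest =>
      rw [PySem.Chars.splitOn.go]
      split
      · have := ih (List.drop sep.length (c :: rest)) [] (cur.reverse :: acc)
        simp at this ⊢; omega
      · exact ih rest (c :: cur) acc

theorem exists_prefix_drop_cons {sep : List Char} (c : Char) (rest : List Char)
    (hnp : ¬ sep <+: (c :: rest)) :
    (∃ j, sep <+: (c :: rest).drop j) ↔ (∃ j, sep <+: rest.drop j) := by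
  constructor
  · rintro ⟨j, hj⟩
    cases j with
    | zero => exact absurd (by simpa using hj) hnp
    | succ j => exact ⟨j, by simpa using hj⟩
  · rintro ⟨j, hj⟩; exact ⟨j + 1, by simpa using hj⟩

theorem go_two_iff (sep : List Char) (hsep : sep ≠ []) (fuel : Nat) :
    ∀ (l cur : List Char) (acc : List (List Char)), l.length + 1 ≤ fuel →
      ((∃ j, sep <+: l.drop j) ↔ acc.length + 2 ≤ (PySem.Chars.splitOn.go sep fuel l cur acc).length) := by
  induction fuel with
  | zero => intro l cur acc h; omega
  | succ f ih =>
    intro l cur acc h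
    match l with
    | [] =>
      simp only [PySem.Chars.splitOn.go, List.drop_nil, List.length_reverse, List.length_cons]
      constructor
      · rintro ⟨j, hj⟩
        exact absurd (List.prefix_nil.mp hj) hsep
      · intro h2; omega
    | c :: rest =>
      rw [PySem.Chars.splitOn.go]
      split
      · next hp =>
        constructor
        · intro _
          have := go_len_ge sep f (List.drop sep.length (c :: rest)) [] (cur.reverse :: acc)
          simp at this ⊢; omega
        · intro _
          exact ⟨0, by simpa using (List.isPrefixOf_iff_prefix.mp hp)⟩
      · next hp =>
        have hnp : ¬ sep <+: (c :: rest) := fun hpre =>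
          hp (List.isPrefixOf_iff_prefix.mpr hpre)
        rw [exists_prefix_drop_cons c rest hnp]
        exact ih rest (c :: cur) acc (by simp at h ⊢; omega)

theorem splitOn_two_iff (s sep : List Char) (hsep : sep ≠ []) :
    1 < (PySem.Chars.splitOn s sep).length ↔ PySem.Chars.isIn sep s = true := by
  rw [← PySem.Chars.exists_prefix_drop_iff_isIn]
  rw [PySem.Chars.splitOn]
  have h := go_two_iff sep hsep (s.length + 1) s [] [] (by omega)
  simp only [List.length_nil] at h
  constructor
  · intro h1; exact h.mpr (by omega)
  · intro hex; have := h.mp hex; omega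

theorem len_split_eq (t : String) :
    ((PySem.Str.split? t "Data_Enrichment").getD []).length
      = (PySem.Chars.splitOn t.toList "Data_Enrichment".toList).length := by
  simp [PySem.Str.split?, PySem.Chars.split?]

theorem isIn_eq_isDEb (t : String) : PySem.Str.isIn "Data_Enrichment" t = isDEb t := by
  unfold isDEb
  rw [show PySem.Str.isIn "Data_Enrichment" t
        = PySem.Chars.isIn "Data_Enrichment".toList t.toList from rfl]
  rw [len_split_eq]
  cases h : PySem.Chars.isIn "Data_Enrichment".toList t.toList with
  | false =>
    symm; simp only [decide_eq_false_iff_not]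
    intro hlt
    have := (splitOn_two_iff t.toList "Data_Enrichment".toList (by decide)).mp hlt
    rw [h] at this; exact Bool.false_ne_true this
  | true =>
    symm; simp only [decide_eq_true_eq]
    exact (splitOn_two_iff t.toList "Data_Enrichment".toList (by decide)).mpr h

-- pointwise lemmas lifted to the lambdas B's filters use
theorem notDE_fun :
    (fun t => !(PySem.Str.isIn "Data_Enrichment" t)) = (fun t => !(isDEb t)) :=
  funext fun t => by rw [isIn_eq_isDEb]

theorem isDE_fun :
    (fun t => PySem.Str.isIn "Data_Enrichment" t) = (fun t => isDEb t) :=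
  funext fun t => by rw [isIn_eq_isDEb]

theorem insert_DM (a b c v : String) :
    (PySem.Dict.mk [("DM", a), ("DE", b), ("DS", c)] : PySem.Dict String String).insert "DM" v
      = PySem.Dict.mk [("DM", v), ("DE", b), ("DS", c)] := by
  simp [PySem.Dict.insert, PySem.Dict.contains]

theorem insert_DE (a b c v : String) :
    (PySem.Dict.mk [("DM", a), ("DE", b), ("DS", c)] : PySem.Dict String String).insert "DE" v
      = PySem.Dict.mk [("DM", a), ("DE", v), ("DS", c)] := by
  simp [PySem.Dict.insert, PySem.Dict.contains]

theorem insert_DS (a b c v : String) :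
    (PySem.Dict.mk [("DM", a), ("DE", b), ("DS", c)] : PySem.Dict String String).insert "DS" v
      = PySem.Dict.mk [("DM", a), ("DE", b), ("DS", v)] := by
  simp [PySem.Dict.insert, PySem.Dict.contains]

theorem getD_DM (a b c : String) :
    (PySem.Dict.mk [("DM", a), ("DE", b), ("DS", c)] : PySem.Dict String String).getD "DM" "" = a := by
  simp [PySem.Dict.getD, PySem.Dict.get?]

theorem getD_DE (a b c : String) :
    (PySem.Dict.mk [("DM", a), ("DE", b), ("DS", c)] : PySem.Dict String String).getD "DE" "" = b := by
  simp [PySem.Dict.getD, PySem.Dict.get?]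

theorem getD_DS (a b c : String) :
    (PySem.Dict.mk [("DM", a), ("DE", b), ("DS", c)] : PySem.Dict String String).getD "DS" "" = c := by
  simp [PySem.Dict.getD, PySem.Dict.get?]

theorem foldA_eq (ts : List String) (flag : Bool) (a b c : String) :
    (ts.foldl
      (fun (st : PySem.Dict String String × Bool) model =>
        if 1 < ((PySem.Str.split? model "Data_Enrichment").getD []).length then
          let modelSplitted := (PySem.Str.split? model ":").getD []
          (st.1.insert "DE" (addValue "DE" ((PySem.List.pyGet? modelSplitted 1).getD "") st.1), true)
        else if st.2 then
          (st.1.insert "DS" (addValue "DS" model st.1), st.2)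
        else
          (st.1.insert "DM" (addValue "DM" model st.1), st.2))
      (PySem.Dict.mk [("DM", a), ("DE", b), ("DS", c)], flag)).1
    = PySem.Dict.mk [("DM", (runA ts flag (a, b, c)).1),
                     ("DE", (runA ts flag (a, b, c)).2.1),
                     ("DS", (runA ts flag (a, b, c)).2.2)] := by
  induction ts generalizing flag a b c with
  | nil => rfl
  | cons t ts ih =>
    rw [List.foldl_cons]
    by_cases h : 1 < ((PySem.Str.split? t "Data_Enrichment").getD []).length
    · have hb : isDEb t = true := by simp [isDEb, h]
      simp only [if_pos h, runA, hb, if_true, addValue, getD_DE, insert_DE, avF]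
      exact ih true a (if (b == "") = true then extrT t else b ++ "." ++ extrT t) c
    · have hb : isDEb t = false := by simp [isDEb, h]
      cases flag with
      | true =>
        simp only [if_neg h, runA, hb, Bool.false_eq_true, if_false, if_true, addValue,
          getD_DS, insert_DS, avF]
        exact ih true a b (if (c == "") = true then t else c ++ "." ++ t)
      | false =>
        simp only [if_neg h, runA, hb, Bool.false_eq_true, if_false, addValue,
          getD_DM, insert_DM, avF]
        exact ih false (if (a == "") = true then t else a ++ "." ++ t) b c

theorem runA_spec (ts : List String) (flag : Bool) (a b c : String) :
    runA ts flag (a, b, c)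
      = (List.foldl avF a (if flag then [] else dmL ts),
         List.foldl avF b (deL ts),
         List.foldl avF c (dsL ts flag)) := by
  induction ts generalizing flag a b c with
  | nil => cases flag <;> rfl
  | cons t ts ih =>
    cases hb : isDEb t with
    | true =>
      simp only [runA, hb, if_true, dmL, deL, dsL, ih, List.foldl_cons]
      cases flag <;> simp
    | false =>
      cases flag with
      | true =>
        simp only [runA, hb, Bool.false_eq_true, if_false, if_true, dmL, deL, dsL, ih,
          List.foldl_cons]
      | false =>
        simp only [runA, hb, Bool.false_eq_true, if_false, dmL, deL, dsL, ih, List.foldl_cons]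

theorem dsL_true (ts : List String) :
    ts.filter (fun t => !(PySem.Str.isIn "Data_Enrichment" t)) = dsL ts true := by
  rw [notDE_fun]
  induction ts with
  | nil => rfl
  | cons t ts ih =>
    cases hb : isDEb t <;> simp [dsL, hb, ih]

theorem dm_take (ts : List String) : ts.take (firstDEIdx ts) = dmL ts := by
  induction ts with
  | nil => rfl
  | cons t ts ih =>
    rw [firstDEIdx, isIn_eq_isDEb]
    cases hb : isDEb t <;> simp [dmL, hb, ih]

theorem ds_drop (ts : List String) :
    (ts.drop (firstDEIdx ts + 1)).filter (fun t => !(PySem.Str.isIn "Data_Enrichment" t))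
      = dsL ts false := by
  induction ts with
  | nil => rfl
  | cons t ts ih =>
    rw [firstDEIdx, isIn_eq_isDEb]
    cases hb : isDEb t with
    | true =>
      rw [dsL, ← dsL_true ts]
      simp [hb]
    | false => simpa [hb, dsL] using ih

theorem deL_filter (ts : List String) :
    (ts.filter (fun t => PySem.Str.isIn "Data_Enrichment" t)).map
        (fun t => (PySem.List.pyGet? ((PySem.Str.split? t ":").getD []) 1).getD "")
      = deL ts := by
  rw [isDE_fun]
  induction ts with
  | nil => rfl
  | cons t ts ih =>
    cases hb : isDEb t <;> simp [deL, hb, ih, extrT]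

-- ===== VERDICT (by name: the statement is the Claim_ definition above) =====
theorem analyzeOrigin_spec : Claim_equal_analyzeOrigin := by
  intro models _ _
  show analyzeOrigin models = analyzeOrigin_alt models
  have hinit : (PySem.Dict.ofList [("DM", ""), ("DE", ""), ("DS", "")] : PySem.Dict String String)
      = PySem.Dict.mk [("DM", ""), ("DE", ""), ("DS", "")] := by decide
  unfold analyzeOrigin analyzeOrigin_alt
  have hdj : ∀ l : List String, dotjoin l = List.foldl avF "" l := fun _ => rfl
  simp only [hinit, foldA_eq, runA_spec, Bool.false_eq_true, if_false,
    PySem.List.slice_to_natCast, PySem.List.slice_from_natCast, dm_take, ds_drop, deL_filter, hdj]
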